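-- pv_equiv track=rewrite | github.com/jimhommes/advent-of-code | 2020/day14.py | to_list_of_bit_strings
-- ===== SOURCE A (Python) =====
-- def to_bit_string(startdec, length):
--     res = []
--     currentdec = startdec
--     for i in reversed(range(length+1)):
--         if 2**i <= currentdec:
--             currentdec -= 2**i
--             res.append('1')
--         else:
--             res.append('0')
--     return "".join(res)
--
-- def to_list_of_bit_strings(amount, msk):
--     res = []
--     for i in range(2 ** amount):
--         res.append(list(to_bit_string(i, amount-1)))
--     for i in range(2 ** amount):
--         subres = msk
--         for repl in res[i]:
--             subres = subres.replace('X', repl, 1)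
--         res[i] = subres
--     return res
-- ===== SOURCE B (Python) =====
-- def to_list_of_bit_strings(amount, msk):
--     # Generate the 2**amount bit tuples directly by recursion (lexicographic,
--     # first bit slowest), and fill the mask's 'X' slots in a single left-to-right
--     # pass per tuple, instead of converting each counter value to binary and
--     # repeatedly calling str.replace.
--     def tuples(n):
--         if n == 0:
--             return [[]]
--         rest = tuples(n - 1)
--         return [[b] + t for b in '01' for t in rest]
--
--     def fill(chars, bits):
--         out = []
--         for c in chars:
--             if c == 'X' and bits:
--                 out.append(bits[0])
--                 bits = bits[1:]
--             else:
--                 out.append(c)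
--         return ''.join(out)
--
--     return [fill(msk, bits) for bits in tuples(amount)]
-- ===== Notes on version B (the rewrite author's own statement) =====
-- stated objective: alternative
-- what changed: B generates the bit tuples directly by recursion over the count (lexicographic product) and fills the mask's X positions in one left-to-right pass per tuple, replacing A's integer-to-binary conversion loop and its repeated str.replace('X', bit, 1) inner scans.
import Mathlib
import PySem

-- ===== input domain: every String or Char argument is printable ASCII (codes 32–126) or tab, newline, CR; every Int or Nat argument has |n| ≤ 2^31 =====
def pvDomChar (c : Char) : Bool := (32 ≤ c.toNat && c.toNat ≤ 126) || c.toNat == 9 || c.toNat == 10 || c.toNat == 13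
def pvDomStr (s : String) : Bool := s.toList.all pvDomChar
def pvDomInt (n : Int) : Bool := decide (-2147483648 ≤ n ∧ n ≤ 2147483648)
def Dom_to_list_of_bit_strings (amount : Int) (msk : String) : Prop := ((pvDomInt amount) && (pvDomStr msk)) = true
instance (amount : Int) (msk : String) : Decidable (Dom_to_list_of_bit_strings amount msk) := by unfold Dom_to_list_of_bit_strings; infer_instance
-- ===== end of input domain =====

-- B generates the bit tuples by recursion and fills the mask's X slots in one pass,
-- instead of A's integer-to-binary loop plus repeated replace('X', b, 1) scans.


-- ===== PORT A =====
-- hand port of subres.replace('X', repl, 1): single-character pattern, count = 1,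
-- so it replaces exactly the first 'X' (exact for this call)
def pvReplaceFirstX : List Char → Char → List Char
  | [], _ => []
  | c :: rest, r => if c = 'X' then r :: rest else c :: pvReplaceFirstX rest r

def to_bit_string (startdec length : Int) : String :=
  String.mk
    ((PySem.List.pyRange 0 (length + 1) 1).reverse.foldl
      (fun (st : List Char × Int) i =>
        if (2 : Int) ^ i.toNat ≤ st.2 then (st.1 ++ ['1'], st.2 - (2 : Int) ^ i.toNat)
        else (st.1 ++ ['0'], st.2))
      ([], startdec)).1

-- Python's 2 ** amount raises TypeError for amount < 0 (excluded by Pre_); the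
-- second Python loop overwrites res[i] in place, which is this map over res.
def to_list_of_bit_strings (amount : Int) (msk : String) : List String :=
  let res := (PySem.List.pyRange 0 ((2 : Int) ^ amount.toNat) 1).map
    (fun i => (to_bit_string i (amount - 1)).toList)
  res.map (fun bits =>
    String.mk (bits.foldl (fun subres repl => pvReplaceFirstX subres repl) msk.toList))

-- ===== PORT B =====
def pvTuples : Nat → List (List Char)
  | 0 => [[]]
  | n + 1 => ['0', '1'].flatMap (fun b => (pvTuples n).map (fun t => b :: t))

def pvFill : List Char → List Char → List Char
  | [], _ => []
  | c :: rest, [] => c :: pvFill rest []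
  | c :: rest, b :: bs => if c = 'X' then b :: pvFill rest bs else c :: pvFill rest (b :: bs)

def to_list_of_bit_strings_alt (amount : Int) (msk : String) : List String :=
  (pvTuples amount.toNat).map (fun bits => String.mk (pvFill msk.toList bits))

-- ===== PRECONDITION & SPEC =====
-- Python A raises TypeError on amount < 0 (range(2 ** amount) with a float); excluded.
def Pre_to_list_of_bit_strings (amount : Int) (msk : String) : Prop := 0 ≤ amount
instance (amount : Int) (msk : String) : Decidable (Pre_to_list_of_bit_strings amount msk) := by
  unfold Pre_to_list_of_bit_strings; infer_instance
def pvWitness_to_list_of_bit_strings : Int × String := (2, "X0X")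

def Spec_to_list_of_bit_strings (amount : Int) (msk : String) (out : List String) : Prop := out = to_list_of_bit_strings_alt amount msk
instance (amount : Int) (msk : String) (out : List String) : Decidable (Spec_to_list_of_bit_strings amount msk out) := by unfold Spec_to_list_of_bit_strings; infer_instance

-- ===== CLAIM (what is proved, stated in full; the proofs are below) =====
def Claim_equal_to_list_of_bit_strings : Prop := ∀ (amount : Int) (msk : String), Dom_to_list_of_bit_strings amount msk → Pre_to_list_of_bit_strings amount msk → Spec_to_list_of_bit_strings amount msk (to_list_of_bit_strings amount msk)

-- ===== LEMMAS AND PROOFS =====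

-- MSB-first binary digits: the value A's inner loop computes
def pvBitsOf : Nat → Int → List Char
  | 0, _ => []
  | n + 1, i =>
    if (2 : Int) ^ n ≤ i then '1' :: pvBitsOf n (i - (2 : Int) ^ n) else '0' :: pvBitsOf n i

theorem pvFoldBits (n : Nat) : ∀ (res : List Char) (cur : Int),
    ((PySem.List.pyRange 0 (n : Int) 1).reverse.foldl
      (fun (st : List Char × Int) i =>
        if (2 : Int) ^ i.toNat ≤ st.2 then (st.1 ++ ['1'], st.2 - (2 : Int) ^ i.toNat)
        else (st.1 ++ ['0'], st.2))
      (res, cur)).1 = res ++ pvBitsOf n cur := by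
  induction n with
  | zero => intro res cur; simp [PySem.List.pyRange_one_eq_nil, pvBitsOf]
  | succ n ih =>
    intro res cur
    have h : PySem.List.pyRange 0 ((n : Int) + 1) 1
        = PySem.List.pyRange 0 (n : Int) 1 ++ [(n : Int)] :=
      PySem.List.pyRange_one_succ_right (by positivity)
    rw [show ((n + 1 : Nat) : Int) = (n : Int) + 1 by push_cast; ring, h]
    simp only [List.reverse_append, List.reverse_cons, List.reverse_nil, List.nil_append,
      List.singleton_append, List.foldl_cons]
    by_cases hc : (2 : Int) ^ ((n : Int)).toNat ≤ cur
    · simp only [hc, if_pos, Int.toNat_natCast] at *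
      rw [ih]
      simp [pvBitsOf, Int.toNat_natCast, hc]
    · simp only [Int.toNat_natCast] at hc
      simp only [Int.toNat_natCast, hc, if_neg, if_false]
      rw [ih]
      simp [pvBitsOf, hc]

theorem pvToBitString (amount : Int) (h : 0 ≤ amount) (i : Int) :
    (to_bit_string i (amount - 1)).toList = pvBitsOf amount.toNat i := by
  unfold to_bit_string
  rw [show amount - 1 + 1 = (amount.toNat : Int) by omega, pvFoldBits amount.toNat [] i]
  rw [List.nil_append]
  exact String.toList_ofList

theorem pvEnum (n : Nat) :
    (List.range (2 ^ n)).map (fun k : Nat => pvBitsOf n (k : Int)) = pvTuples n := by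
  induction n with
  | zero => simp [pvTuples, pvBitsOf, List.range_succ]
  | succ n ih =>
    have hsplit : List.range (2 ^ (n + 1)) =
        List.range (2 ^ n) ++ (List.range (2 ^ n)).map (fun k => 2 ^ n + k) := by
      rw [show 2 ^ (n + 1) = 2 ^ n + 2 ^ n by ring, List.range_add]
    rw [hsplit, List.map_append, List.map_map]
    have h1 : (List.range (2 ^ n)).map (fun k : Nat => pvBitsOf (n + 1) (k : Int))
        = (pvTuples n).map (fun t => '0' :: t) := by
      rw [← ih, List.map_map]
      refine List.map_congr_left (fun k hk => ?_)
      have : (k : Int) < (2 : Int) ^ n := by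
        have := List.mem_range.mp hk
        exact_mod_cast this
      simp [pvBitsOf, not_le.mpr this]
    have h2 : (List.range (2 ^ n)).map
          ((fun k : Nat => pvBitsOf (n + 1) (k : Int)) ∘ fun k => 2 ^ n + k)
        = (pvTuples n).map (fun t => '1' :: t) := by
      rw [← ih, List.map_map]
      refine List.map_congr_left (fun k hk => ?_)
      have hle : (2 : Int) ^ n ≤ ((2 ^ n + k : Nat) : Int) := by push_cast; omega
      simp only [Function.comp]
      rw [show pvBitsOf (n + 1) ((2 ^ n + k : Nat) : Int)
          = '1' :: pvBitsOf n (((2 ^ n + k : Nat) : Int) - 2 ^ n) by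
        simp [pvBitsOf, hle]]
      congr 2
      push_cast; ring
    rw [h1, h2]
    simp [pvTuples]

theorem pvFill_nil (s : List Char) : pvFill s [] = s := by
  induction s with
  | nil => rfl
  | cons c rest ih => simp [pvFill, ih]

theorem pvFill_cons_ne (c : Char) (rest bits : List Char) (hc : c ≠ 'X') :
    pvFill (c :: rest) bits = c :: pvFill rest bits := by
  cases bits with
  | nil => rfl
  | cons b bs => simp [pvFill, hc]

theorem pvFill_replace (b : Char) (hb : b ≠ 'X') (bs : List Char) : ∀ (s : List Char),
    pvFill (pvReplaceFirstX s b) bs = pvFill s (b :: bs) := by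
  intro s
  induction s with
  | nil => rfl
  | cons c rest ih =>
    by_cases hc : c = 'X'
    · subst hc
      rw [show pvReplaceFirstX ('X' :: rest) b = b :: rest from by simp [pvReplaceFirstX]]
      rw [pvFill_cons_ne b rest bs hb]
      simp [pvFill]
    · simp only [pvReplaceFirstX, if_neg hc]
      rw [pvFill_cons_ne c _ bs hc, ih, pvFill_cons_ne c rest (b :: bs) hc]

theorem pvFoldFill (bits : List Char) : ∀ (s : List Char), (∀ b ∈ bits, b ≠ 'X') →
    bits.foldl (fun subres repl => pvReplaceFirstX subres repl) s = pvFill s bits := by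
  induction bits with
  | nil => intro s _; simp [pvFill_nil]
  | cons b bs ih =>
    intro s h
    have hb : b ≠ 'X' := h b (List.mem_cons_self)
    rw [List.foldl_cons, ih (pvReplaceFirstX s b) (fun x hx => h x (List.mem_cons_of_mem b hx)),
      pvFill_replace b hb bs s]

theorem pvTuples_bits (n : Nat) : ∀ bits ∈ pvTuples n, ∀ b ∈ bits, b ≠ 'X' := by
  induction n with
  | zero => intro bits hb; simp [pvTuples] at hb; simp [hb]
  | succ n ih =>
    intro bits hb
    simp only [pvTuples, List.flatMap_cons, List.flatMap_nil, List.append_nil,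
      List.mem_append, List.mem_map] at hb
    rcases hb with ⟨t, ht, rfl⟩ | ⟨t, ht, rfl⟩ <;>
      intro b hbmem <;> rcases List.mem_cons.mp hbmem with rfl | hmem
    · decide
    · exact ih t ht b hmem
    · decide
    · exact ih t ht b hmem

theorem pvRangeCast (m : Nat) :
    PySem.List.pyRange 0 (m : Int) 1 = (List.range m).map Int.ofNat := by
  rw [PySem.List.pyRange_one]
  simp [Int.ofNat_eq_natCast]

-- ===== VERDICT (by name: the statement is the Claim_ definition above) =====
theorem to_list_of_bit_strings_spec : Claim_equal_to_list_of_bit_strings := by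
  intro amount msk _ hpre
  unfold Spec_to_list_of_bit_strings to_list_of_bit_strings to_list_of_bit_strings_alt
  have hcast : (2 : Int) ^ amount.toNat = ((2 ^ amount.toNat : Nat) : Int) := by push_cast; ring
  rw [hcast, pvRangeCast]
  have hphase1 : (List.map Int.ofNat (List.range (2 ^ amount.toNat))).map
      (fun i => (to_bit_string i (amount - 1)).toList) = pvTuples amount.toNat := by
    rw [List.map_map, ← pvEnum amount.toNat]
    exact List.map_congr_left (fun k _ => pvToBitString amount hpre (Int.ofNat k))
  rw [hphase1]
  exact List.map_congr_left (fun bits hb => by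
    rw [pvFoldFill bits msk.toList (pvTuples_bits amount.toNat bits hb)])
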